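-- pv_equiv track=rewrite | github.com/LadyPary/DialDefer | code/aio_data_creation/filter.py | count_speaker_turns
-- ===== SOURCE A (Python) =====
-- from typing import Dict, List, Optional, Tuple
--
-- def count_speaker_turns(messages: List[dict]) -> int:
--     """
--     Speaker turns = number of contiguous speaker blocks, ignoring empty texts.
--     Example (empty ignored): A:"hi", A:"", A:"ok", B:"yo" => turns = 2
--     """
--     last = None
--     turns = 0
--     for m in messages:
--         text = (m.get("text", "") or "")
--         if text.strip() == "":
--             continue
--         sp = m.get("speaker", "")
--         if sp != last:
--             turns += 1
--             last = sp
--     return turns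
-- ===== SOURCE B (Python) =====
-- def count_speaker_turns(messages):
--     """
--     Speaker turns = number of contiguous speaker blocks, ignoring empty texts.
--     Two-stage: filter the non-blank speakers, then count blocks as
--     total length minus the number of equal adjacent pairs.
--     """
--     speakers = [m.get("speaker", "") for m in messages
--                 if ((m.get("text", "") or "")).strip() != ""]
--     return len(speakers) - sum(a == b for a, b in zip(speakers, speakers[1:]))
-- ===== Notes on version B (the rewrite author's own statement) =====
-- stated objective: idiomatic
-- what changed: Replaced the single accumulator loop tracking a 'last' speaker with a two-stage pass: a comprehension that materialises the list of speakers with non-blank text, then a closed-form count of blocks as len(speakers) minus the number of equal adjacent pairs (zip with its own tail).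
import Mathlib
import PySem

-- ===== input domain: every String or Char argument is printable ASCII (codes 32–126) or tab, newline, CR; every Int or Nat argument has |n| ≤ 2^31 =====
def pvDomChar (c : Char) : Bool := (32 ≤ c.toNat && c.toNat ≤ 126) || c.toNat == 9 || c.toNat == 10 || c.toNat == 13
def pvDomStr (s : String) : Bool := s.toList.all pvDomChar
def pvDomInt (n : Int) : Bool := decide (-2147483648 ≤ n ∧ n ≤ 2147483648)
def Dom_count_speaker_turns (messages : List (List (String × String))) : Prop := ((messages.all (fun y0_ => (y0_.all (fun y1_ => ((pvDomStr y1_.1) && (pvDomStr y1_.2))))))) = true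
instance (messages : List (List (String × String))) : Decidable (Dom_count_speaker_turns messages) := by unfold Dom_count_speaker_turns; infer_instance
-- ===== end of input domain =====

-- B replaces A's single accumulator loop (tracking the last speaker) with a two-stage
-- pass: filter the non-blank-text speakers, then count blocks as length minus equal
-- adjacent pairs (idiomatic; same cost).

-- ===== PORT A =====
def count_speaker_turns (messages : List (List (String × String))) : Int :=
  -- state = (last, turns)
  (messages.foldl (fun (st : Option String × Int) m =>
      let text := PySem.Dict.getD (PySem.Dict.mk m) "text" ""
      let text := if text = "" then "" else text      -- `or ""`
      if PySem.Str.strip text = "" then st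
      else
        let sp := PySem.Dict.getD (PySem.Dict.mk m) "speaker" ""
        if some sp ≠ st.1 then (some sp, st.2 + 1) else st)
    (none, 0)).2

-- ===== PORT B =====
def count_speaker_turns_alt (messages : List (List (String × String))) : Int :=
  let speakers :=
    (messages.filter (fun m =>
        let text := PySem.Dict.getD (PySem.Dict.mk m) "text" ""
        let text := if text = "" then "" else text
        PySem.Str.strip text ≠ "")).map
      (fun m => PySem.Dict.getD (PySem.Dict.mk m) "speaker" "")
  (speakers.length : Int)
    - ((speakers.zip (speakers.drop 1)).countP (fun p => p.1 == p.2) : Int)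

-- ===== PRECONDITION & SPEC =====
def Spec_count_speaker_turns (messages : List (List (String × String))) (out : Int) : Prop := out = count_speaker_turns_alt messages
instance (messages : List (List (String × String))) (out : Int) : Decidable (Spec_count_speaker_turns messages out) := by unfold Spec_count_speaker_turns; infer_instance

-- ===== CLAIM (what is proved, stated in full; the proofs are below) =====
def Claim_equal_count_speaker_turns : Prop := ∀ (messages : List (List (String × String))), Dom_count_speaker_turns messages → Spec_count_speaker_turns messages (count_speaker_turns messages)

-- ===== LEMMAS AND PROOFS =====

-- runs l xs = number of speaker changes seen by A's loop over speaker list xs with last = l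
def pvRuns : Option String → List String → Int
  | _, [] => 0
  | l, x :: xs => (if some x ≠ l then 1 else 0) + pvRuns (some x) xs

def pvAStep (st : Option String × Int) (m : List (String × String)) : Option String × Int :=
  let text := PySem.Dict.getD (PySem.Dict.mk m) "text" ""
  let text := if text = "" then "" else text
  if PySem.Str.strip text = "" then st
  else
    let sp := PySem.Dict.getD (PySem.Dict.mk m) "speaker" ""
    if some sp ≠ st.1 then (some sp, st.2 + 1) else st

def pvKeep (m : List (String × String)) : Bool :=
  let text := PySem.Dict.getD (PySem.Dict.mk m) "text" ""
  let text := if text = "" then "" else text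
  PySem.Str.strip text ≠ ""

def pvSpeakers (ms : List (List (String × String))) : List String :=
  (ms.filter pvKeep).map (fun m => PySem.Dict.getD (PySem.Dict.mk m) "speaker" "")

lemma pvFoldl_eq_runs (ms : List (List (String × String))) :
    ∀ (l : Option String) (t : Int),
      (ms.foldl pvAStep (l, t)).2 = t + pvRuns l (pvSpeakers ms) := by
  induction ms with
  | nil => intro l t; simp [pvSpeakers, pvRuns]
  | cons m rest ih =>
    intro l t
    by_cases hb : PySem.Str.strip
        (if PySem.Dict.getD (PySem.Dict.mk m) "text" "" = "" then ""
         else PySem.Dict.getD (PySem.Dict.mk m) "text" "") = ""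
    · have hsp : pvSpeakers (m :: rest) = pvSpeakers rest := by
        simp [pvSpeakers, pvKeep, hb]
      have hstep : pvAStep (l, t) m = (l, t) := by
        simp [pvAStep, hb]
      rw [List.foldl_cons, hstep, ih, hsp]
    · have hsp : pvSpeakers (m :: rest) =
          PySem.Dict.getD (PySem.Dict.mk m) "speaker" "" :: pvSpeakers rest := by
        simp [pvSpeakers, pvKeep, hb]
      by_cases hne : some (PySem.Dict.getD (PySem.Dict.mk m) "speaker" "") = l
      · have hstep : pvAStep (l, t) m = (l, t) := by
          simp [pvAStep, hb, hne]
        rw [List.foldl_cons, hstep, ih, hsp, pvRuns, ← hne]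
        simp
      · have hstep : pvAStep (l, t) m =
            (some (PySem.Dict.getD (PySem.Dict.mk m) "speaker" ""), t + 1) := by
          simp [pvAStep, hb, hne]
        rw [List.foldl_cons, hstep, ih, hsp, pvRuns]
        simp [hne]; ring

lemma pvRuns_some (xs : List String) : ∀ a : String,
    pvRuns (some a) xs =
      (xs.length : Int) - (((a :: xs).zip xs).countP (fun p => p.1 == p.2) : Int) := by
  induction xs with
  | nil => intro a; simp [pvRuns]
  | cons b ys ih =>
    intro a
    rw [pvRuns, ih b]
    by_cases hab : a = b
    · subst hab; simp
    · simp [hab, Ne.symm hab]; ring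

lemma pvRuns_none (xs : List String) :
    pvRuns none xs =
      (xs.length : Int) - ((xs.zip (xs.drop 1)).countP (fun p => p.1 == p.2) : Int) := by
  cases xs with
  | nil => simp [pvRuns]
  | cons x ys =>
    rw [pvRuns, pvRuns_some ys x]
    simp; ring

-- ===== VERDICT (by name: the statement is the Claim_ definition above) =====
theorem count_speaker_turns_spec : Claim_equal_count_speaker_turns := by
  intro messages _
  unfold Spec_count_speaker_turns
  show (messages.foldl pvAStep (none, 0)).2 = _
  rw [pvFoldl_eq_runs, pvRuns_none, zero_add]
  rfl
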